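-- pv_equiv track=rewrite | github.com/tomabou/cpu_core | tools/asm.py | label_func
-- ===== SOURCE A (Python) =====
-- from typing import List
--
-- def is_not_label(tks):
--     return tks[0][-1] != ':'
--
-- def label_func(content: List[List[str]],program_location):
--     gl_pos = len(content)* 4 + program_location
--     new_content = []
--     labels = dict()
--     for tks in content:
--         if tks[0] == '.comm':
--             labels[tks[1]] = gl_pos
--             gl_pos = gl_pos + int(tks[2])
--         elif is_not_label(tks):
--             new_content.append(tks)
--         else:
--             labels[tks[0][:-1]] = 4*len(new_content)
--     return new_content, labels
-- ===== SOURCE B (Python) =====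
-- def label_func(content, program_location):
--     # Classify every line once, then compute each symbol's address by a closed-form
--     # prefix expression over that classification (no running accumulators).
--     kinds = ['c' if tks[0] == '.comm' else 'l' if tks[0].endswith(':') else 'i'
--              for tks in content]
--     sizes = [int(tks[2]) if k == 'c' else 0 for k, tks in zip(kinds, content)]
--     new_content = [tks for k, tks in zip(kinds, content) if k == 'i']
--     base = 4 * len(content) + program_location
--     labels = {}
--     for i in range(len(content)):
--         tks = content[i]
--         if kinds[i] == 'c':
--             labels[tks[1]] = base + sum(sizes[:i])
--         elif kinds[i] == 'l':
--             labels[tks[0][:-1]] = 4 * kinds[:i].count('i')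
--     return new_content, labels
-- ===== Notes on version B (the rewrite author's own statement) =====
-- stated objective: alternative
-- what changed: B replaces A's single stateful accumulating loop by a classify-then-address scheme: it tags every line once ('c'/'l'/'i'), then computes each symbol's address independently by a closed-form prefix expression (sum(sizes[:i]) for globals, 4*kinds[:i].count('i') for labels) instead of threading gl_pos and len(new_content) through the loop.
import Mathlib
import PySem

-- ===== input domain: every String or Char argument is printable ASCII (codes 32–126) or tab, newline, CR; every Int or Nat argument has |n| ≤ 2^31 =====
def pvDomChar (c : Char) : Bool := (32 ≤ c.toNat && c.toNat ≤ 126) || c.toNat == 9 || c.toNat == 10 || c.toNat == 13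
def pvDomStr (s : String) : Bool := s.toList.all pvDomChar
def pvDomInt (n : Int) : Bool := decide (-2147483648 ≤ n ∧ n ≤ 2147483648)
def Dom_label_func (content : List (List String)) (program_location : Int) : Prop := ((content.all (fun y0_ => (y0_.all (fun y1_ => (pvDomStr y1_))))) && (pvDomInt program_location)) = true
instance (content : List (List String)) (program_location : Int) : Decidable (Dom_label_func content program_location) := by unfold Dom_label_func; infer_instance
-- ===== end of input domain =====

-- B replaces A's single accumulating loop by classify-then-address: tag each line once,
-- then compute every symbol's value by a closed-form prefix expression; different decomposition, same results.


-- ===== PORT A =====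
-- A's helper is_not_label(tks): tks[0][-1] != ':'
def is_not_label (tks : List String) : Bool :=
  (PySem.Str.pyGet? ((PySem.List.pyGet? tks 0).getD "") (-1)).getD ' ' ≠ ':'

-- one iteration of A's for-loop; state = (gl_pos, new_content, labels)
def labelStepA (st : Int × List (List String) × PySem.Dict String Int) (tks : List String) :
    Int × List (List String) × PySem.Dict String Int :=
  let t0 := (PySem.List.pyGet? tks 0).getD ""
  if t0 = ".comm" then
    (st.1 + (PySem.Int.ofStr? ((PySem.List.pyGet? tks 2).getD "")).getD 0,
     st.2.1,
     st.2.2.insert ((PySem.List.pyGet? tks 1).getD "") st.1)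
  else if is_not_label tks then
    (st.1, st.2.1 ++ [tks], st.2.2)
  else
    (st.1, st.2.1,
     st.2.2.insert (PySem.Str.slice t0 none (some (-1))) (4 * (st.2.1.length : Int)))

def label_func (content : List (List String)) (program_location : Int) :
    List (List String) × (List (String × Int)) :=
  let st := content.foldl labelStepA
    ((content.length : Int) * 4 + program_location, [], PySem.Dict.empty)
  (st.2.1, st.2.2.items)

-- ===== PORT B =====
-- B's classifier: 'c' for '.comm', 'l' for a label line, 'i' for an instruction
def kindB (tks : List String) : Char :=
  if (PySem.List.pyGet? tks 0).getD "" = ".comm" then 'c'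
  else if PySem.Str.endswith ((PySem.List.pyGet? tks 0).getD "") ":" then 'l' else 'i'

-- int(tks[2])
def sizeOfTk (tks : List String) : Int :=
  (PySem.Int.ofStr? ((PySem.List.pyGet? tks 2).getD "")).getD 0

-- body of B's for-loop over range(len(content))
def bStep (content : List (List String)) (kinds : List Char) (sizes : List Int) (base : Int)
    (lab : PySem.Dict String Int) (i : Int) : PySem.Dict String Int :=
  let tks := (PySem.List.pyGet? content i).getD []
  if (PySem.List.pyGet? kinds i).getD ' ' = 'c' then
    lab.insert ((PySem.List.pyGet? tks 1).getD "")
      (base + (PySem.List.slice sizes none (some i)).sum)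
  else if (PySem.List.pyGet? kinds i).getD ' ' = 'l' then
    lab.insert (PySem.Str.slice ((PySem.List.pyGet? tks 0).getD "") none (some (-1)))
      (4 * ((PySem.List.slice kinds none (some i)).count 'i' : Int))
  else lab

def label_func_alt (content : List (List String)) (program_location : Int) :
    List (List String) × (List (String × Int)) :=
  let kinds := content.map kindB
  let sizes := (kinds.zip content).map (fun p => if p.1 = 'c' then sizeOfTk p.2 else 0)
  let new_content := ((kinds.zip content).filter (fun p => p.1 == 'i')).map Prod.snd
  let base := 4 * (content.length : Int) + program_location
  let labels := (PySem.List.pyRange 0 (content.length : Int) 1).foldl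
    (bStep content kinds sizes base) PySem.Dict.empty
  (new_content, labels.items)

-- ===== PRECONDITION & SPEC =====
-- Pre_ excludes exactly the inputs on which A raises: a line with no tokens or an empty first
-- token (IndexError), and a '.comm' line with fewer than 3 tokens (IndexError) or whose size
-- field is not a valid int literal (ValueError).
def Pre_label_func (content : List (List String)) (program_location : Int) : Prop :=
  ∀ tks ∈ content, tks ≠ [] ∧ (tks.getD 0 "").toList ≠ [] ∧
    (tks.getD 0 "" = ".comm" →
      3 ≤ tks.length ∧ (PySem.Int.ofStr? (tks.getD 2 "")).isSome)
instance (content : List (List String)) (program_location : Int) : Decidable (Pre_label_func content program_location) := by unfold Pre_label_func; infer_instance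

def pvWitness_label_func : List (List String) × Int :=
  ([[".comm", "g", "8"], ["main:"], ["add", "r1"], ["loop:"], ["sub", "r2"]], 100)

def Spec_label_func (content : List (List String)) (program_location : Int) (out : List (List String) × (List (String × Int))) : Prop := out = label_func_alt content program_location
instance (content : List (List String)) (program_location : Int) (out : List (List String) × (List (String × Int))) : Decidable (Spec_label_func content program_location out) := by unfold Spec_label_func; infer_instance

-- ===== CLAIM (what is proved, stated in full; the proofs are below) =====
def Claim_equal_label_func : Prop := ∀ (content : List (List String)) (program_location : Int), Dom_label_func content program_location → Pre_label_func content program_location → Spec_label_func content program_location (label_func content program_location)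

-- ===== LEMMAS AND PROOFS =====

-- B's size of one line as a function of the line alone
def sizeB (tks : List String) : Int := if kindB tks = 'c' then sizeOfTk tks else 0

-- endswith with a single character reads the last character
lemma endswith_single (s : List Char) (c : Char) :
    PySem.Chars.endswith s [c] = true ↔ s.getLast? = some c := by
  rw [PySem.Chars.endswith_iff, List.getLast?_eq_some_iff]
  constructor
  · rintro ⟨t, rfl⟩; exact ⟨t, rfl⟩
  · rintro ⟨t, rfl⟩; exact ⟨t, rfl⟩

lemma endswith_colon (s : String) :
    PySem.Str.endswith s ":" = true ↔ (PySem.Str.pyGet? s (-1)).getD ' ' = ':' := by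
  have hcl : (":" : String).toList = [':'] := rfl
  simp only [PySem.Str.endswith_eq, PySem.Str.pyGet?_eq, PySem.Chars.pyGet?_eq_listPyGet?,
    PySem.List.pyGet?_neg_one, hcl, endswith_single]
  cases h : s.toList.getLast? with
  | none => simp
  | some c => simp

-- classification agreement: A's branch tests in terms of B's kindB
lemma kindB_c_iff (tks : List String) :
    kindB tks = 'c' ↔ ((PySem.List.pyGet? tks 0).getD "") = ".comm" := by
  unfold kindB; split_ifs with h1 h2 <;> simp_all

lemma kindB_l_iff (tks : List String) :
    kindB tks = 'l' ↔ (((PySem.List.pyGet? tks 0).getD "") ≠ ".comm" ∧ is_not_label tks = false) := by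
  unfold kindB is_not_label
  split_ifs with h1 h2
  · simp [h1]
  · rw [endswith_colon] at h2
    simp only [PySem.Str.pyGet?_eq, PySem.Chars.pyGet?_eq_listPyGet?] at h2
    simp [h1, h2]
  · rw [endswith_colon] at h2
    simp only [PySem.Str.pyGet?_eq, PySem.Chars.pyGet?_eq_listPyGet?] at h2
    simp [h1, h2]

lemma kindB_cases (tks : List String) :
    kindB tks = 'c' ∨ kindB tks = 'l' ∨ kindB tks = 'i' := by
  unfold kindB; split_ifs <;> simp

-- the bridge: A's fold over the first j lines equals B's closed-form data at j
set_option maxRecDepth 4096 in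
lemma bridge (content : List (List String)) (base : Int) :
    ∀ j : Nat, j ≤ content.length →
      (content.take j).foldl labelStepA (base, [], PySem.Dict.empty) =
        (base + ((content.map sizeB).take j).sum,
         (content.take j).filter (fun t => kindB t == 'i'),
         (PySem.List.pyRange 0 (j : Int) 1).foldl
           (bStep content (content.map kindB) (content.map sizeB) base) PySem.Dict.empty) := by
  intro j hj
  induction j with
  | zero => simp [PySem.List.pyRange_one_eq_nil]
  | succ j ih =>
    have hjlt : j < content.length := by omega
    have ihs := ih (by omega)
    have htake : content.take (j + 1) = content.take j ++ [content[j]] := by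
      rw [List.take_add_one]
      simp [List.getElem?_eq_getElem hjlt]
    have hrange : PySem.List.pyRange 0 ((j : Int) + 1) 1 =
        PySem.List.pyRange 0 (j : Int) 1 ++ [(j : Int)] :=
      PySem.List.pyRange_one_succ_right (by positivity)
    have hkj : PySem.List.pyGet? (content.map kindB) (j : Int) = some (kindB content[j]) := by
      simp [hjlt]
    have hcj : PySem.List.pyGet? content (j : Int) = some content[j] := by
      simp [hjlt]
    have hslice_s : PySem.List.slice (content.map sizeB) none (some (j : Int)) =
        (content.map sizeB).take j := PySem.List.slice_to_natCast _ _
    have hslice_k : PySem.List.slice (content.map kindB) none (some (j : Int)) =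
        (content.map kindB).take j := PySem.List.slice_to_natCast _ _
    have hsum : ((content.map sizeB).take (j + 1)).sum =
        ((content.map sizeB).take j).sum + sizeB content[j] := by
      rw [List.take_add_one]
      simp [hjlt]
    have hcount : (((content.map kindB).take j).count 'i' : Int) =
        (((content.take j).filter (fun t => kindB t == 'i')).length : Int) := by
      rw [← List.map_take, List.count_eq_countP, List.countP_map,
        List.countP_eq_length_filter]
      rfl
    rw [htake, List.foldl_append, ihs]
    have hpush : ((j : Int)) + 1 = (((j + 1 : Nat) : Int)) := by push_cast; ring
    rw [← hpush, hrange, List.foldl_append]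
    simp only [List.foldl_cons, List.foldl_nil, List.filter_append, List.filter_cons,
      List.filter_nil, hsum]
    by_cases hc : kindB content[j] = 'c'
    · have ht0 := (kindB_c_iff _).mp hc
      simp only [labelStepA, bStep, hkj, hcj, Option.getD_some, hslice_s, hslice_k,
        if_pos ht0, hc, Prod.mk.injEq]
      refine ⟨?_, ?_, ?_⟩
      · simp [sizeB, sizeOfTk, hc]
        ring
      · simp
      · simp
    · by_cases hl : kindB content[j] = 'l'
      · obtain ⟨ht0, hnl⟩ := (kindB_l_iff _).mp hl
        simp only [labelStepA, bStep, hkj, hcj, Option.getD_some, hslice_s, hslice_k,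
          if_neg ht0, hnl, Bool.false_eq_true, if_false, hl, Prod.mk.injEq]
        refine ⟨?_, ?_, ?_⟩
        · simp [sizeB, hl]
        · simp
        · simp only [hcount]
          rw [if_neg (by decide : ¬ ('l' : Char) = 'c'), if_pos trivial]
      · have hi : kindB content[j] = 'i' := by
          rcases kindB_cases content[j] with h | h | h
          · exact absurd h hc
          · exact absurd h hl
          · exact h
        have ht0 : ((PySem.List.pyGet? content[j] 0).getD "") ≠ ".comm" := by
          intro h; exact hc ((kindB_c_iff _).mpr h)
        have hnl : is_not_label content[j] = true := by
          by_cases h : is_not_label content[j] = true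
          · exact h
          · exact absurd ((kindB_l_iff _).mpr ⟨ht0, by simpa using h⟩) hl
        simp only [labelStepA, bStep, hkj, hcj, Option.getD_some,
          if_neg ht0, hnl, if_true, hi, Prod.mk.injEq]
        refine ⟨?_, ?_, ?_⟩
        · simp [sizeB, hi]
        · simp
        · rw [if_neg (by decide : ¬ ('i' : Char) = 'c'), if_neg (by decide : ¬ ('i' : Char) = 'l')]

-- B's zip-of-map data in terms of per-line functions
lemma zip_map_self {α β : Type} (f : α → β) (l : List α) :
    (l.map f).zip l = l.map (fun a => (f a, a)) := by
  induction l with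
  | nil => rfl
  | cons x xs ih => simp [ih]

-- ===== VERDICT (by name: the statement is the Claim_ definition above) =====
theorem label_func_spec : Claim_equal_label_func := by
  intro content program_location _ _
  unfold Spec_label_func label_func label_func_alt
  have hb : (content.length : Int) * 4 + program_location
      = 4 * (content.length : Int) + program_location := by ring
  have h := bridge content (4 * (content.length : Int) + program_location)
    content.length (le_refl _)
  rw [List.take_length] at h
  simp only [hb, h, zip_map_self, List.filter_map, List.map_map, Prod.mk.injEq]
  have hp : ((fun p : Char × List String => p.1 == 'i') ∘ fun a => (kindB a, a)) =
      (fun t => kindB t == 'i') := rfl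
  have hq : (Prod.snd ∘ fun a : List String => (kindB a, a)) = id := rfl
  have hs : content.map ((fun p : Char × List String => if p.1 = 'c' then sizeOfTk p.2 else 0) ∘
      fun a => (kindB a, a)) = content.map sizeB := by
    simp [Function.comp, sizeB]
  rw [hp, hq, hs, List.map_id]
  exact ⟨rfl, rfl⟩
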